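-- pv_equiv track=rewrite | github.com/muradghzd/Padding-Oracle-Attack | p2_20200798.py | divide_and_pad
-- ===== SOURCE A (Python) =====
-- def divide_and_pad(text):
--     bytearray_text = bytearray.fromhex(str(text.encode('utf-8').hex()))
--     n = len(bytearray_text)
--     q = int(n/8)
--     r = n%8
--     pad_list = [8-r]*(8-r)
--     ans = []
--     if n >= 8:
--         for i in range(q):
--             ans.append(list(bytearray_text[8*i:8*i+8]))
--         if r != 0:
--             x = list(bytearray_text[8*q:])
--             x.extend(pad_list)
--             ans.append(x)
--         else:
--             ans.append(pad_list)
--     else: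
--         bytearray_text.extend(pad_list)
--         ans.append(list(bytearray_text))
--     return ans
-- ===== SOURCE B (Python) =====
-- def divide_and_pad(text):
--     data = list(text.encode('utf-8'))
--     pad = 8 - len(data) % 8
--     data.extend([pad] * pad)
--     return [data[i:i+8] for i in range(0, len(data), 8)]
-- ===== Notes on version B (the rewrite author's own statement) =====
-- stated objective: simpler
-- what changed: Pad the whole byte list once with a uniform [pad]*pad extension and then chunk it by repeatedly splitting off the first 8 bytes, replacing A's nested n>=8 / r==0 branches and its index-arithmetic slicing loop over range(q).
import Mathlib
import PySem

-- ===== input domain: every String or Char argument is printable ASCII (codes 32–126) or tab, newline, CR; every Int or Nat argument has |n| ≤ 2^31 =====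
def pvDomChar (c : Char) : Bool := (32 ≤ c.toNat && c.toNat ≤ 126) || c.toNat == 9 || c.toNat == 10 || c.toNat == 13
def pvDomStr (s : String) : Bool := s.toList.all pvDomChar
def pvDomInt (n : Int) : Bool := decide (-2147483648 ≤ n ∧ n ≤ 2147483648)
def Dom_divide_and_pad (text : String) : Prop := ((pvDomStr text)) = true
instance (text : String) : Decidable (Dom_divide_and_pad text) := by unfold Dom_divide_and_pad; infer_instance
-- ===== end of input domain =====

-- B pads the byte list once with a uniform [pad]*pad extension and chunks it in one
-- comprehension, instead of A's nested n>=8 / r==0 branches; same value everywhere (objective: simpler).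

-- ===== PORT A =====
-- text.encode('utf-8') on the Dom's ASCII strings is exactly the list of code points.
-- int(n/8) with n ≥ 0 (n is a string length, so float division is exact) is floor division by 8.
def divide_and_pad (text : String) : List (List Int) :=
  let bytearray_text : List Int := text.toList.map (fun c => (c.toNat : Int))
  let n : Int := PySem.List.len bytearray_text
  let q : Int := PySem.Int.floordiv n 8
  let r : Int := PySem.Int.mod n 8
  let pad_list : List Int := List.replicate (8 - r).toNat (8 - r)
  let ans : List (List Int) := []
  if n ≥ 8 then
    let ans := (PySem.List.pyRange 0 q 1).foldl
      (fun acc i => acc ++ [PySem.List.slice bytearray_text (some (8*i)) (some (8*i+8))]) ans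
    if r ≠ 0 then
      ans ++ [PySem.List.slice bytearray_text (some (8*q)) none ++ pad_list]
    else
      ans ++ [pad_list]
  else
    ans ++ [bytearray_text ++ pad_list]

-- ===== PORT B =====
-- data.extend([pad]*pad) becomes the appended replicate; the comprehension
-- [data[i:i+8] for i in range(0, len(data), 8)] is the map over the step-8 range.
def divide_and_pad_alt (text : String) : List (List Int) :=
  let data : List Int := text.toList.map (fun c => (c.toNat : Int))
  let pad : Int := 8 - PySem.Int.mod (PySem.List.len data) 8
  let data2 : List Int := data ++ List.replicate pad.toNat pad
  (PySem.List.pyRange 0 (PySem.List.len data2) 8).map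
    (fun i => PySem.List.slice data2 (some i) (some (i+8)))

-- ===== PRECONDITION & SPEC =====
def Spec_divide_and_pad (text : String) (out : List (List Int)) : Prop := out = divide_and_pad_alt text
instance (text : String) (out : List (List Int)) : Decidable (Spec_divide_and_pad text out) := by unfold Spec_divide_and_pad; infer_instance

-- ===== CLAIM (what is proved, stated in full; the proofs are below) =====
def Claim_equal_divide_and_pad : Prop := ∀ (text : String), Dom_divide_and_pad text → Spec_divide_and_pad text (divide_and_pad text)

-- ===== LEMMAS AND PROOFS =====

-- xs[j:j+8] with a Nat start is take 8 of drop j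
theorem pvSliceBlk (L : List Int) (j : Nat) :
    PySem.List.slice L (some (j:Int)) (some ((j:Int)+8)) = (L.drop j).take 8 := by
  have h2 : ((j:Nat):Int) + 8 = ((j+8 : Nat):Int) := by push_cast; ring
  rw [h2, PySem.List.slice_natCast]
  congr 1
  omega

-- B's comprehension over a list of length 8*K is the list of its K blocks of 8
theorem pvAltMap (K : Nat) (P : List Int) (h : P.length = 8 * K) :
    (PySem.List.pyRange 0 (PySem.List.len P) 8).map
      (fun i => PySem.List.slice P (some i) (some (i+8)))
    = (List.range K).map (fun i => (P.drop (8*i)).take 8) := by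
  rw [PySem.List.len_eq, h, PySem.List.pyRange_of_pos 0 _ (by norm_num)]
  have hcnt : (if (0:Int) < ((8*K : Nat):Int) then ((((8*K : Nat):Int) - 0 + 8 - 1) / 8).toNat else 0) = K := by
    rcases Nat.eq_zero_or_pos K with h0 | h0
    · simp [h0]
    · rw [if_pos (by exact_mod_cast (by omega : 0 < 8*K))]
      have : ((8*K : Nat):Int) - 0 + 8 - 1 = ((8*K+7 : Nat):Int) := by push_cast; ring
      rw [this, (by norm_num : (8:Int) = ((8:Nat):Int)), ← Int.natCast_div]
      omega
  rw [hcnt, List.map_map]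
  apply List.map_congr_left
  intro k _
  simp only [Function.comp]
  have : (0:Int) + 8 * (k:Int) = ((8*k : Nat):Int) := by push_cast; ring
  rw [this, pvSliceBlk]

theorem divide_and_pad_spec_aux (L : List Int) :
    (let n : Int := PySem.List.len L
     let q : Int := PySem.Int.floordiv n 8
     let r : Int := PySem.Int.mod n 8
     let pad_list : List Int := List.replicate (8 - r).toNat (8 - r)
     let ans : List (List Int) := []
     if n ≥ 8 then
       let ans := (PySem.List.pyRange 0 q 1).foldl
         (fun acc i => acc ++ [PySem.List.slice L (some (8*i)) (some (8*i+8))]) ans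
       if r ≠ 0 then
         ans ++ [PySem.List.slice L (some (8*q)) none ++ pad_list]
       else
         ans ++ [pad_list]
     else
       ans ++ [L ++ pad_list]) =
    (let pad : Int := 8 - PySem.Int.mod (PySem.List.len L) 8
     let data2 : List Int := L ++ List.replicate pad.toNat pad
     (PySem.List.pyRange 0 (PySem.List.len data2) 8).map
       (fun i => PySem.List.slice data2 (some i) (some (i+8)))) := by
  dsimp only
  have hmod : PySem.Int.mod (PySem.List.len L) 8 = ((L.length % 8 : Nat) : Int) := by
    rw [PySem.List.len_eq]; exact_mod_cast PySem.Int.mod_natCast L.length 8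
  have hq : PySem.Int.floordiv (PySem.List.len L) 8 = ((L.length / 8 : Nat) : Int) := by
    rw [PySem.List.len_eq]; exact_mod_cast PySem.Int.floordiv_natCast L.length 8
  rw [hmod, hq, PySem.List.len_eq]
  set m := L.length with hm
  have hpadN : ((8 : Int) - ((m % 8 : Nat) : Int)).toNat = 8 - m % 8 := by omega
  have hpadV : ((8 : Int) - ((m % 8 : Nat) : Int)) = ((8 - m % 8 : Nat) : Int) := by omega
  rw [hpadN, hpadV]
  set padN : Nat := 8 - m % 8 with hpad
  set R : List Int := List.replicate padN ((padN : Nat) : Int) with hR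
  have hRlen : R.length = padN := by simp [hR]
  have hmod8 : m % 8 < 8 := Nat.mod_lt _ (by omega)
  have hPk : (L ++ R).length = 8 * (m / 8 + 1) := by simp [hRlen, ← hm]; omega
  rw [pvAltMap (m / 8 + 1) _ hPk]
  rcases Nat.lt_or_ge m 8 with hlt | hge
  · rw [if_neg (by exact_mod_cast (by omega : ¬ ((m:Int) ≥ 8)))]
    have hd0 : m / 8 = 0 := Nat.div_eq_of_lt hlt
    rw [hd0]
    simp [List.take_of_length_le (le_of_eq (by omega : (L ++ R).length = 8))]
  · rw [if_pos (by exact_mod_cast (by omega : (m:Int) ≥ 8))]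
    have hfold := PySem.List.foldl_append_singleton_eq_map
      (fun i => PySem.List.slice L (some (8*i)) (some (8*i+8)))
      (PySem.List.pyRange 0 ((m / 8 : Nat) : Int) 1) ([] : List (List Int))
    rw [hfold, List.nil_append, PySem.List.pyRange_one]
    have htoNat : (((m / 8 : Nat) : Int) - 0).toNat = m / 8 := by omega
    rw [htoNat, List.map_map, List.range_succ, List.map_append, List.map_cons, List.map_nil]
    have hdropq : (L ++ R).drop (8 * (m / 8)) = L.drop (8 * (m / 8)) ++ R :=
      List.drop_append_of_le_length (by omega)
    have hlast8 : (L.drop (8 * (m / 8)) ++ R).length = 8 := by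
      simp [hRlen, ← hm]; omega
    have hmap : (List.range (m / 8)).map
          ((fun i => PySem.List.slice L (some (8*i)) (some (8*i+8))) ∘ (fun k : Nat => 0 + (k:Int)))
        = (List.range (m / 8)).map (fun i => ((L ++ R).drop (8*i)).take 8) := by
      apply List.map_congr_left
      intro i hi
      rw [List.mem_range] at hi
      simp only [Function.comp]
      have hc : (8:Int) * (0 + (i:Int)) = ((8*i : Nat):Int) := by push_cast; ring
      rw [hc, pvSliceBlk, List.drop_append_of_le_length (by omega),
          List.take_append_of_le_length (by simp [← hm]; omega)]
    rw [hmap]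
    by_cases hr0 : m % 8 = 0
    · rw [if_neg (by exact_mod_cast (by omega : ¬ (((m % 8 : Nat) : Int)) ≠ 0))]
      congr 1
      rw [hdropq, List.take_of_length_le (le_of_eq hlast8)]
      have : L.drop (8 * (m / 8)) = [] := by
        apply List.drop_eq_nil_of_le; omega
      simp [this]
    · rw [if_pos (by exact_mod_cast (by omega : (((m % 8 : Nat) : Int)) ≠ 0))]
      congr 1
      rw [hdropq, List.take_of_length_le (le_of_eq hlast8)]
      congr 1
      have : (8:Int) * ((m / 8 : Nat) : Int) = ((8 * (m/8) : Nat) : Int) := by push_cast; ring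
      rw [this, PySem.List.slice_from_natCast]

-- ===== VERDICT (by name: the statement is the Claim_ definition above) =====
theorem divide_and_pad_spec : Claim_equal_divide_and_pad := by
  intro text _
  unfold Spec_divide_and_pad divide_and_pad divide_and_pad_alt
  exact divide_and_pad_spec_aux _
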